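-- pv_equiv track=rewrite | github.com/dylenyedc/pythonlearning | homework13/fakecoin1.py | findFalseCoin
-- ===== SOURCE A (Python) =====
-- from math import ceil
--
-- def findFalseCoin(coins):
--     #查找范围：从idxStart下标开始的iLength个硬币
--     idxStart, iLength = 0,11
--     while True:
--         if iLength == 1:
--             return idxStart
--
--         n = ceil(iLength/3)
--         wPart1 = sum(coins[idxStart:idxStart+n])
--         wPart2 = sum(coins[idxStart+n:idxStart+2*n])
--         wPart3 = sum(coins[idxStart+2*n:idxStart+iLength])
--         if wPart1 < wPart2:
--             idxStart, iLength = idxStart, n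
--         elif wPart1 > wPart2:
--             idxStart, iLength = idxStart+n,n
--         else:
--             idxStart, iLength = idxStart+2*n,iLength-2*n
-- ===== SOURCE B (Python) =====
-- def findFalseCoin(coins):
--     # The search always starts from the fixed state (start 0, 11 coins), so the
--     # whole ternary search unrolls into a fixed three-weighing decision tree.
--     def w(a, b):
--         return sum(coins[a:b])
--     # weighing 1: coins[0:4] vs coins[4:8]
--     if w(0, 4) == w(4, 8):
--         # fake among coins[8:11]; weighing: coins[8] vs coins[9]
--         if w(8, 9) < w(9, 10):
--             return 8
--         if w(8, 9) > w(9, 10):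
--             return 9
--         return 10
--     q = 0 if w(0, 4) < w(4, 8) else 4
--     # weighing 2: coins[q:q+2] vs coins[q+2:q+4]
--     p = q if w(q, q + 2) < w(q + 2, q + 4) else q + 2
--     # weighing 3: coins[p] vs coins[p+1]
--     return p if w(p, p + 1) < w(p + 1, p + 2) else p + 1
-- ===== Notes on version B (the rewrite author's own statement) =====
-- stated objective: alternative
-- what changed: A's iterative ternary-search loop always starts from the fixed state (start 0, length 11), so B unrolls it into a flat three-weighing decision tree with no loop and no unused third-pan sum.
import Mathlib
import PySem

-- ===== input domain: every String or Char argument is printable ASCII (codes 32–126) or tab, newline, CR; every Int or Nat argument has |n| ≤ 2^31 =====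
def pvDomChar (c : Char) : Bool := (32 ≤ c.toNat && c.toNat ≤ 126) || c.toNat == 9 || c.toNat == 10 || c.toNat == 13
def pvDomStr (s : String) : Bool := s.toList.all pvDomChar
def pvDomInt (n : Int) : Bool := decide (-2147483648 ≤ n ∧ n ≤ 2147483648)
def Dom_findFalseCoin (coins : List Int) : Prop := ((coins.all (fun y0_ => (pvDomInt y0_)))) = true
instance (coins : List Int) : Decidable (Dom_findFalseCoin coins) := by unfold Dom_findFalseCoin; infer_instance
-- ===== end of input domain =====

-- B replaces A's iterative ternary-search loop (whose start state is fixed at (0,11)) by a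
-- fully unrolled three-weighing decision tree with no loop, dropping the unused third-pan sum.


-- ===== PORT A =====
-- ceil(iLength/3); Python computes ceil of a float division — exact for the small
-- iLength values (≤ 11) the loop ever sees.
def pvCeil3 (i : Int) : Int := -(PySem.Int.floordiv (-i) 3)

-- the 'while True' loop; fuel only makes the recursion total (the loop does not
-- terminate on every input; Pre_ excludes exactly those inputs). From the fixed start
-- state (0, 11) every terminating run makes at most 3 transitions, so fuel 5 is ample.
def loopA (coins : List Int) : Nat → Int → Int → Int
  | 0, idxStart, _ => idxStart
  | fuel+1, idxStart, iLength =>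
    if iLength = 1 then idxStart
    else
      let n := pvCeil3 iLength
      let wPart1 := (PySem.List.slice coins (some idxStart) (some (idxStart+n))).sum
      let wPart2 := (PySem.List.slice coins (some (idxStart+n)) (some (idxStart+2*n))).sum
      let _wPart3 := (PySem.List.slice coins (some (idxStart+2*n)) (some (idxStart+iLength))).sum
      if wPart1 < wPart2 then loopA coins fuel idxStart n
      else if wPart1 > wPart2 then loopA coins fuel (idxStart+n) n
      else loopA coins fuel (idxStart+2*n) (iLength-2*n)

def findFalseCoin (coins : List Int) : Int := loopA coins 5 0 11

-- ===== PORT B =====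
-- w a b = sum(coins[a:b]) — the weight of the pan holding coins[a:b]
def pvW (coins : List Int) (a b : Int) : Int := (PySem.List.slice coins (some a) (some b)).sum

def findFalseCoin_alt (coins : List Int) : Int :=
  if pvW coins 0 4 = pvW coins 4 8 then
    if pvW coins 8 9 < pvW coins 9 10 then 8
    else if pvW coins 8 9 > pvW coins 9 10 then 9
    else 10
  else
    let q : Int := if pvW coins 0 4 < pvW coins 4 8 then 0 else 4
    let p : Int := if pvW coins q (q+2) < pvW coins (q+2) (q+4) then q else q+2
    if pvW coins p (p+1) < pvW coins (p+1) (p+2) then p else p+1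

-- ===== PRECONDITION & SPEC =====
-- Pre_ excludes exactly the inputs on which A never returns: its loop runs forever
-- when the two weighed groups balance at group size 2 or 1 (iLength 4 or 2), since
-- iLength then becomes 0 and stays 0.
def Pre_findFalseCoin (coins : List Int) : Prop :=
  pvW coins 0 4 = pvW coins 4 8 ∨
    (let q : Int := if pvW coins 0 4 < pvW coins 4 8 then 0 else 4
     pvW coins q (q+2) ≠ pvW coins (q+2) (q+4) ∧
       (let p : Int := if pvW coins q (q+2) < pvW coins (q+2) (q+4) then q else q+2
        pvW coins p (p+1) ≠ pvW coins (p+1) (p+2)))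
instance (coins : List Int) : Decidable (Pre_findFalseCoin coins) := by
  unfold Pre_findFalseCoin; infer_instance

def pvWitness_findFalseCoin : List Int := [1, 1, 1, 1, 1, 1, 1, 1, 1, 1, 2]

def Spec_findFalseCoin (coins : List Int) (out : Int) : Prop := out = findFalseCoin_alt coins
instance (coins : List Int) (out : Int) : Decidable (Spec_findFalseCoin coins out) := by unfold Spec_findFalseCoin; infer_instance

-- ===== CLAIM (what is proved, stated in full; the proofs are below) =====
def Claim_equal_findFalseCoin : Prop := ∀ (coins : List Int), Dom_findFalseCoin coins → Pre_findFalseCoin coins → Spec_findFalseCoin coins (findFalseCoin coins)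

-- ===== LEMMAS AND PROOFS =====

theorem pvCeil3_11 : pvCeil3 11 = 4 := by decide
theorem pvCeil3_4 : pvCeil3 4 = 2 := by decide
theorem pvCeil3_3 : pvCeil3 3 = 1 := by decide
theorem pvCeil3_2 : pvCeil3 2 = 1 := by decide

theorem pvCeil3_1 : pvCeil3 1 = 1 := by decide
theorem pvCeil3_0 : pvCeil3 0 = 0 := by decide

-- ===== VERDICT (by name: the statement is the Claim_ definition above) =====
theorem findFalseCoin_spec : Claim_equal_findFalseCoin := by
  intro coins _ hpre
  unfold Spec_findFalseCoin findFalseCoin findFalseCoin_alt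
  unfold Pre_findFalseCoin at hpre
  simp only [pvW] at hpre ⊢
  simp only [loopA, pvCeil3_11, pvCeil3_4, pvCeil3_2]
  norm_num at hpre ⊢
  rcases lt_trichotomy ((PySem.List.slice coins none (some 4)).sum)
      ((PySem.List.slice coins (some 4) (some 8)).sum) with h1 | h1 | h1
  · rcases lt_trichotomy ((PySem.List.slice coins none (some 2)).sum)
        ((PySem.List.slice coins (some 2) (some 4)).sum) with h2 | h2 | h2
    · rcases lt_trichotomy ((PySem.List.slice coins none (some 1)).sum)
          ((PySem.List.slice coins (some 1) (some 2)).sum) with h3 | h3 | h3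
      · first
        | simp [pvCeil3_3, pvCeil3_2, pvCeil3_1, pvCeil3_0, h1, h1.ne, h1.ne', not_lt.mpr h1.le, h2, h2.ne, h2.ne', not_lt.mpr h2.le, h3, h3.ne, h3.ne', not_lt.mpr h3.le] at hpre ⊢
        | simp [pvCeil3_3, pvCeil3_2, pvCeil3_1, pvCeil3_0, h1, h1.ne, h1.ne', not_lt.mpr h1.le, h2, h2.ne, h2.ne', not_lt.mpr h2.le, h3, h3.ne, h3.ne', not_lt.mpr h3.le] at hpre
        | simp [pvCeil3_3, pvCeil3_2, pvCeil3_1, pvCeil3_0, h1, h1.ne, h1.ne', not_lt.mpr h1.le, h2, h2.ne, h2.ne', not_lt.mpr h2.le, h3, h3.ne, h3.ne', not_lt.mpr h3.le]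
      · first
        | simp [pvCeil3_3, pvCeil3_2, pvCeil3_1, pvCeil3_0, h1, h1.ne, h1.ne', not_lt.mpr h1.le, h2, h2.ne, h2.ne', not_lt.mpr h2.le, h3] at hpre ⊢
        | simp [pvCeil3_3, pvCeil3_2, pvCeil3_1, pvCeil3_0, h1, h1.ne, h1.ne', not_lt.mpr h1.le, h2, h2.ne, h2.ne', not_lt.mpr h2.le, h3] at hpre
        | simp [pvCeil3_3, pvCeil3_2, pvCeil3_1, pvCeil3_0, h1, h1.ne, h1.ne', not_lt.mpr h1.le, h2, h2.ne, h2.ne', not_lt.mpr h2.le, h3]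
      · first
        | simp [pvCeil3_3, pvCeil3_2, pvCeil3_1, pvCeil3_0, h1, h1.ne, h1.ne', not_lt.mpr h1.le, h2, h2.ne, h2.ne', not_lt.mpr h2.le, h3, h3.ne, h3.ne', not_lt.mpr h3.le] at hpre ⊢
        | simp [pvCeil3_3, pvCeil3_2, pvCeil3_1, pvCeil3_0, h1, h1.ne, h1.ne', not_lt.mpr h1.le, h2, h2.ne, h2.ne', not_lt.mpr h2.le, h3, h3.ne, h3.ne', not_lt.mpr h3.le] at hpre
        | simp [pvCeil3_3, pvCeil3_2, pvCeil3_1, pvCeil3_0, h1, h1.ne, h1.ne', not_lt.mpr h1.le, h2, h2.ne, h2.ne', not_lt.mpr h2.le, h3, h3.ne, h3.ne', not_lt.mpr h3.le]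
    · first
      | simp [pvCeil3_3, pvCeil3_2, pvCeil3_1, pvCeil3_0, h1, h1.ne, h1.ne', not_lt.mpr h1.le, h2] at hpre ⊢
      | simp [pvCeil3_3, pvCeil3_2, pvCeil3_1, pvCeil3_0, h1, h1.ne, h1.ne', not_lt.mpr h1.le, h2] at hpre
      | simp [pvCeil3_3, pvCeil3_2, pvCeil3_1, pvCeil3_0, h1, h1.ne, h1.ne', not_lt.mpr h1.le, h2]
    · rcases lt_trichotomy ((PySem.List.slice coins (some 2) (some 3)).sum)
          ((PySem.List.slice coins (some 3) (some 4)).sum) with h3 | h3 | h3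
      · first
        | simp [pvCeil3_3, pvCeil3_2, pvCeil3_1, pvCeil3_0, h1, h1.ne, h1.ne', not_lt.mpr h1.le, h2, h2.ne, h2.ne', not_lt.mpr h2.le, h3, h3.ne, h3.ne', not_lt.mpr h3.le] at hpre ⊢
        | simp [pvCeil3_3, pvCeil3_2, pvCeil3_1, pvCeil3_0, h1, h1.ne, h1.ne', not_lt.mpr h1.le, h2, h2.ne, h2.ne', not_lt.mpr h2.le, h3, h3.ne, h3.ne', not_lt.mpr h3.le] at hpre
        | simp [pvCeil3_3, pvCeil3_2, pvCeil3_1, pvCeil3_0, h1, h1.ne, h1.ne', not_lt.mpr h1.le, h2, h2.ne, h2.ne', not_lt.mpr h2.le, h3, h3.ne, h3.ne', not_lt.mpr h3.le]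
      · first
        | simp [pvCeil3_3, pvCeil3_2, pvCeil3_1, pvCeil3_0, h1, h1.ne, h1.ne', not_lt.mpr h1.le, h2, h2.ne, h2.ne', not_lt.mpr h2.le, h3] at hpre ⊢
        | simp [pvCeil3_3, pvCeil3_2, pvCeil3_1, pvCeil3_0, h1, h1.ne, h1.ne', not_lt.mpr h1.le, h2, h2.ne, h2.ne', not_lt.mpr h2.le, h3] at hpre
        | simp [pvCeil3_3, pvCeil3_2, pvCeil3_1, pvCeil3_0, h1, h1.ne, h1.ne', not_lt.mpr h1.le, h2, h2.ne, h2.ne', not_lt.mpr h2.le, h3]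
      · first
        | simp [pvCeil3_3, pvCeil3_2, pvCeil3_1, pvCeil3_0, h1, h1.ne, h1.ne', not_lt.mpr h1.le, h2, h2.ne, h2.ne', not_lt.mpr h2.le, h3, h3.ne, h3.ne', not_lt.mpr h3.le] at hpre ⊢
        | simp [pvCeil3_3, pvCeil3_2, pvCeil3_1, pvCeil3_0, h1, h1.ne, h1.ne', not_lt.mpr h1.le, h2, h2.ne, h2.ne', not_lt.mpr h2.le, h3, h3.ne, h3.ne', not_lt.mpr h3.le] at hpre
        | simp [pvCeil3_3, pvCeil3_2, pvCeil3_1, pvCeil3_0, h1, h1.ne, h1.ne', not_lt.mpr h1.le, h2, h2.ne, h2.ne', not_lt.mpr h2.le, h3, h3.ne, h3.ne', not_lt.mpr h3.le]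
  · -- first weighing balances: fake among coins[8:11]
    rcases lt_trichotomy ((PySem.List.slice coins (some 8) (some 9)).sum)
        ((PySem.List.slice coins (some 9) (some 10)).sum) with h2 | h2 | h2
    · first
      | simp [pvCeil3_3, pvCeil3_2, pvCeil3_1, pvCeil3_0, h1, h2, h2.ne, h2.ne', not_lt.mpr h2.le] at hpre ⊢
      | simp [pvCeil3_3, pvCeil3_2, pvCeil3_1, pvCeil3_0, h1, h2, h2.ne, h2.ne', not_lt.mpr h2.le] at hpre
      | simp [pvCeil3_3, pvCeil3_2, pvCeil3_1, pvCeil3_0, h1, h2, h2.ne, h2.ne', not_lt.mpr h2.le]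
    · first
      | simp [pvCeil3_3, pvCeil3_2, pvCeil3_1, pvCeil3_0, h1, h2] at hpre ⊢
      | simp [pvCeil3_3, pvCeil3_2, pvCeil3_1, pvCeil3_0, h1, h2] at hpre
      | simp [pvCeil3_3, pvCeil3_2, pvCeil3_1, pvCeil3_0, h1, h2]
    · first
      | simp [pvCeil3_3, pvCeil3_2, pvCeil3_1, pvCeil3_0, h1, h2, h2.ne, h2.ne', not_lt.mpr h2.le] at hpre ⊢
      | simp [pvCeil3_3, pvCeil3_2, pvCeil3_1, pvCeil3_0, h1, h2, h2.ne, h2.ne', not_lt.mpr h2.le] at hpre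
      | simp [pvCeil3_3, pvCeil3_2, pvCeil3_1, pvCeil3_0, h1, h2, h2.ne, h2.ne', not_lt.mpr h2.le]
  · rcases lt_trichotomy ((PySem.List.slice coins (some 4) (some 6)).sum)
        ((PySem.List.slice coins (some 6) (some 8)).sum) with h2 | h2 | h2
    · rcases lt_trichotomy ((PySem.List.slice coins (some 4) (some 5)).sum)
          ((PySem.List.slice coins (some 5) (some 6)).sum) with h3 | h3 | h3
      · first
        | simp [pvCeil3_3, pvCeil3_2, pvCeil3_1, pvCeil3_0, h1, h1.ne, h1.ne', not_lt.mpr h1.le, h2, h2.ne, h2.ne', not_lt.mpr h2.le, h3, h3.ne, h3.ne', not_lt.mpr h3.le] at hpre ⊢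
        | simp [pvCeil3_3, pvCeil3_2, pvCeil3_1, pvCeil3_0, h1, h1.ne, h1.ne', not_lt.mpr h1.le, h2, h2.ne, h2.ne', not_lt.mpr h2.le, h3, h3.ne, h3.ne', not_lt.mpr h3.le] at hpre
        | simp [pvCeil3_3, pvCeil3_2, pvCeil3_1, pvCeil3_0, h1, h1.ne, h1.ne', not_lt.mpr h1.le, h2, h2.ne, h2.ne', not_lt.mpr h2.le, h3, h3.ne, h3.ne', not_lt.mpr h3.le]
      · first
        | simp [pvCeil3_3, pvCeil3_2, pvCeil3_1, pvCeil3_0, h1, h1.ne, h1.ne', not_lt.mpr h1.le, h2, h2.ne, h2.ne', not_lt.mpr h2.le, h3] at hpre ⊢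
        | simp [pvCeil3_3, pvCeil3_2, pvCeil3_1, pvCeil3_0, h1, h1.ne, h1.ne', not_lt.mpr h1.le, h2, h2.ne, h2.ne', not_lt.mpr h2.le, h3] at hpre
        | simp [pvCeil3_3, pvCeil3_2, pvCeil3_1, pvCeil3_0, h1, h1.ne, h1.ne', not_lt.mpr h1.le, h2, h2.ne, h2.ne', not_lt.mpr h2.le, h3]
      · first
        | simp [pvCeil3_3, pvCeil3_2, pvCeil3_1, pvCeil3_0, h1, h1.ne, h1.ne', not_lt.mpr h1.le, h2, h2.ne, h2.ne', not_lt.mpr h2.le, h3, h3.ne, h3.ne', not_lt.mpr h3.le] at hpre ⊢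
        | simp [pvCeil3_3, pvCeil3_2, pvCeil3_1, pvCeil3_0, h1, h1.ne, h1.ne', not_lt.mpr h1.le, h2, h2.ne, h2.ne', not_lt.mpr h2.le, h3, h3.ne, h3.ne', not_lt.mpr h3.le] at hpre
        | simp [pvCeil3_3, pvCeil3_2, pvCeil3_1, pvCeil3_0, h1, h1.ne, h1.ne', not_lt.mpr h1.le, h2, h2.ne, h2.ne', not_lt.mpr h2.le, h3, h3.ne, h3.ne', not_lt.mpr h3.le]
    · first
      | simp [pvCeil3_3, pvCeil3_2, pvCeil3_1, pvCeil3_0, h1, h1.ne, h1.ne', not_lt.mpr h1.le, h2] at hpre ⊢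
      | simp [pvCeil3_3, pvCeil3_2, pvCeil3_1, pvCeil3_0, h1, h1.ne, h1.ne', not_lt.mpr h1.le, h2] at hpre
      | simp [pvCeil3_3, pvCeil3_2, pvCeil3_1, pvCeil3_0, h1, h1.ne, h1.ne', not_lt.mpr h1.le, h2]
    · rcases lt_trichotomy ((PySem.List.slice coins (some 6) (some 7)).sum)
          ((PySem.List.slice coins (some 7) (some 8)).sum) with h3 | h3 | h3
      · first
        | simp [pvCeil3_3, pvCeil3_2, pvCeil3_1, pvCeil3_0, h1, h1.ne, h1.ne', not_lt.mpr h1.le, h2, h2.ne, h2.ne', not_lt.mpr h2.le, h3, h3.ne, h3.ne', not_lt.mpr h3.le] at hpre ⊢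
        | simp [pvCeil3_3, pvCeil3_2, pvCeil3_1, pvCeil3_0, h1, h1.ne, h1.ne', not_lt.mpr h1.le, h2, h2.ne, h2.ne', not_lt.mpr h2.le, h3, h3.ne, h3.ne', not_lt.mpr h3.le] at hpre
        | simp [pvCeil3_3, pvCeil3_2, pvCeil3_1, pvCeil3_0, h1, h1.ne, h1.ne', not_lt.mpr h1.le, h2, h2.ne, h2.ne', not_lt.mpr h2.le, h3, h3.ne, h3.ne', not_lt.mpr h3.le]
      · first
        | simp [pvCeil3_3, pvCeil3_2, pvCeil3_1, pvCeil3_0, h1, h1.ne, h1.ne', not_lt.mpr h1.le, h2, h2.ne, h2.ne', not_lt.mpr h2.le, h3] at hpre ⊢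
        | simp [pvCeil3_3, pvCeil3_2, pvCeil3_1, pvCeil3_0, h1, h1.ne, h1.ne', not_lt.mpr h1.le, h2, h2.ne, h2.ne', not_lt.mpr h2.le, h3] at hpre
        | simp [pvCeil3_3, pvCeil3_2, pvCeil3_1, pvCeil3_0, h1, h1.ne, h1.ne', not_lt.mpr h1.le, h2, h2.ne, h2.ne', not_lt.mpr h2.le, h3]
      · first
        | simp [pvCeil3_3, pvCeil3_2, pvCeil3_1, pvCeil3_0, h1, h1.ne, h1.ne', not_lt.mpr h1.le, h2, h2.ne, h2.ne', not_lt.mpr h2.le, h3, h3.ne, h3.ne', not_lt.mpr h3.le] at hpre ⊢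
        | simp [pvCeil3_3, pvCeil3_2, pvCeil3_1, pvCeil3_0, h1, h1.ne, h1.ne', not_lt.mpr h1.le, h2, h2.ne, h2.ne', not_lt.mpr h2.le, h3, h3.ne, h3.ne', not_lt.mpr h3.le] at hpre
        | simp [pvCeil3_3, pvCeil3_2, pvCeil3_1, pvCeil3_0, h1, h1.ne, h1.ne', not_lt.mpr h1.le, h2, h2.ne, h2.ne', not_lt.mpr h2.le, h3, h3.ne, h3.ne', not_lt.mpr h3.le]
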